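-- pv_equiv track=rewrite | github.com/Leejim12/- | Programmers_Python/옹알이(1).py | solution
-- ===== SOURCE A (Python) =====
-- def solution(babbling):
--     tp=[]
--     All = ["aya", "ye", "woo", "ma",""]
--     for i in All:
--         for j in All:
--             for k in All:
--                 for l in All:
--                     for m in All:
--                         tem = i+j+k+l+m
--                         tp.append(tem)
--     answer = 0
--     for i in babbling:
--         if i in tp:
--             answer = answer + 1
--     return answer
-- ===== SOURCE B (Python) =====
-- def solution(babbling):
--     tokens = ("aya", "ye", "woo", "ma")
--     answer = 0
--     for word in babbling:
--         s = word
--         cnt = 0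
--         while s and cnt < 5:
--             for t in tokens:
--                 if s.startswith(t):
--                     s = s[len(t):]
--                     cnt += 1
--                     break
--             else:
--                 break
--         if not s:
--             answer += 1
--     return answer
-- ===== Notes on version B (the rewrite author's own statement) =====
-- stated objective: faster
-- what changed: Instead of enumerating all 3125 concatenations of up to five allowed tokens and scanning that table for each word, B parses each word directly by greedily stripping the (unique, since token first letters are pairwise distinct) matching token prefix up to five times and counts the word iff it reduces to empty.
import Mathlib
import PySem

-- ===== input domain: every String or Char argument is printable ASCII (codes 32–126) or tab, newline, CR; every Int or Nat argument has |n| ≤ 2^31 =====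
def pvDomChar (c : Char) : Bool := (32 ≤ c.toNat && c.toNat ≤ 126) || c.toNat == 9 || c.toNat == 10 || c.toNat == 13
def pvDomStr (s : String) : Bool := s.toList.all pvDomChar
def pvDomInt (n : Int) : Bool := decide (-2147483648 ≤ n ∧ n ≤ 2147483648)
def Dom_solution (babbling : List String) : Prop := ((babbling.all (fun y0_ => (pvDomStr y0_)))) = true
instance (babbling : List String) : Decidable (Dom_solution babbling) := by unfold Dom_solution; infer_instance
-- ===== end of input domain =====

-- B replaces A's precomputed table of the 3125 concatenations of ≤5 tokens by a greedy
-- prefix-stripping parse of each word (valid tokens have pairwise distinct first letters,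
-- so the parse is deterministic); objective: faster.

-- ===== PORT A =====
def solution (babbling : List String) : Int :=
  let All : List String := ["aya", "ye", "woo", "ma", ""]
  let tp : List String :=
    All.foldl (fun tp i =>
      All.foldl (fun tp j =>
        All.foldl (fun tp k =>
          All.foldl (fun tp l =>
            All.foldl (fun tp m =>
              tp ++ [i ++ j ++ k ++ l ++ m]) tp) tp) tp) tp) []
  babbling.foldl (fun answer i => if i ∈ tp then answer + 1 else answer) 0

-- ===== PORT B =====
-- Source B's token tuple, as char lists (exact: the strings are ASCII literals)
def pvTokens : List (List Char) := [['a','y','a'], ['y','e'], ['w','o','o'], ['m','a']]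

-- the inner 'for t in tokens: if s.startswith(t): … break / else: break' = first matching token
def pvFindTok (s : List Char) : Option (List Char) :=
  pvTokens.find? (fun t => PySem.Chars.startswith s t)

-- the 'while s and cnt < 5' loop; budget = 5 - cnt, each pass strips one matching token
def pvStrip (s : List Char) (budget : Nat) : List Char :=
  match budget with
  | 0 => s
  | b + 1 =>
    if s = [] then s
    else
      match pvFindTok s with
      | some t => pvStrip (s.drop t.length) b
      | none => s

def solution_alt (babbling : List String) : Int :=
  babbling.foldl (fun answer word =>
    if pvStrip word.toList 5 = [] then answer + 1 else answer) 0

-- ===== PRECONDITION & SPEC =====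
def Spec_solution (babbling : List String) (out : Int) : Prop := out = solution_alt babbling
instance (babbling : List String) (out : Int) : Decidable (Spec_solution babbling out) := by unfold Spec_solution; infer_instance

-- ===== CLAIM (what is proved, stated in full; the proofs are below) =====
def Claim_equal_solution : Prop := ∀ (babbling : List String), Dom_solution babbling → Spec_solution babbling (solution babbling)

-- ===== LEMMAS AND PROOFS =====

-- the five building blocks of A's table, as char lists (the four tokens plus the empty string)
def pvAllC : List (List Char) := pvTokens ++ [[]]

-- "w is a concatenation of at most n tokens"
def pvLang (n : Nat) (w : List Char) : Prop :=
  ∃ toks : List (List Char), toks.length ≤ n ∧ (∀ t ∈ toks, t ∈ pvTokens) ∧ w = toks.flatten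

-- membership in A's table = "w is i+j+k+l+m with each factor a token or empty"
lemma pv_mem_tp_iff (w : String) :
    w ∈ ((["aya", "ye", "woo", "ma", ""] : List String).foldl (fun tp i =>
      ["aya", "ye", "woo", "ma", ""].foldl (fun tp j =>
        ["aya", "ye", "woo", "ma", ""].foldl (fun tp k =>
          ["aya", "ye", "woo", "ma", ""].foldl (fun tp l =>
            ["aya", "ye", "woo", "ma", ""].foldl (fun tp m =>
              tp ++ [i ++ j ++ k ++ l ++ m]) tp) tp) tp) tp) []) ↔
    ∃ i ∈ (["aya", "ye", "woo", "ma", ""] : List String), ∃ j ∈ (["aya", "ye", "woo", "ma", ""] : List String),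
    ∃ k ∈ (["aya", "ye", "woo", "ma", ""] : List String), ∃ l ∈ (["aya", "ye", "woo", "ma", ""] : List String),
    ∃ m ∈ (["aya", "ye", "woo", "ma", ""] : List String), w = i ++ j ++ k ++ l ++ m := by
  simp only [PySem.List.foldl_append_eq_flatMap, List.nil_append, List.mem_flatMap,
    List.mem_singleton]

lemma pv_toList_mem (s : String) (hs : s ∈ (["aya", "ye", "woo", "ma", ""] : List String)) :
    s.toList ∈ pvAllC := by
  fin_cases hs <;> decide

lemma pv_str_of_mem (c : List Char) (hc : c ∈ pvAllC) :
    ∃ s : String, s ∈ (["aya", "ye", "woo", "ma", ""] : List String) ∧ s.toList = c := by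
  simp only [pvAllC, pvTokens, List.mem_append, List.mem_cons, List.not_mem_nil, or_false] at hc
  rcases hc with (rfl | rfl | rfl | rfl) | rfl
  exacts [⟨"aya", by decide, by decide⟩, ⟨"ye", by decide, by decide⟩,
    ⟨"woo", by decide, by decide⟩, ⟨"ma", by decide, by decide⟩, ⟨"", by decide, by decide⟩]

-- the string-level decomposition, moved to the character level
lemma pv_str_decomp_iff_char (w : String) :
    (∃ i ∈ (["aya", "ye", "woo", "ma", ""] : List String), ∃ j ∈ (["aya", "ye", "woo", "ma", ""] : List String),
     ∃ k ∈ (["aya", "ye", "woo", "ma", ""] : List String), ∃ l ∈ (["aya", "ye", "woo", "ma", ""] : List String),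
     ∃ m ∈ (["aya", "ye", "woo", "ma", ""] : List String), w = i ++ j ++ k ++ l ++ m) ↔
    (∃ i ∈ pvAllC, ∃ j ∈ pvAllC, ∃ k ∈ pvAllC, ∃ l ∈ pvAllC, ∃ m ∈ pvAllC,
      w.toList = i ++ j ++ k ++ l ++ m) := by
  constructor
  · rintro ⟨i, hi, j, hj, k, hk, l, hl, m, hm, rfl⟩
    exact ⟨i.toList, pv_toList_mem i hi, j.toList, pv_toList_mem j hj, k.toList, pv_toList_mem k hk,
      l.toList, pv_toList_mem l hl, m.toList, pv_toList_mem m hm, by simp⟩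
  · rintro ⟨i, hi, j, hj, k, hk, l, hl, m, hm, heq⟩
    obtain ⟨si, hsi, hi'⟩ := pv_str_of_mem i hi
    obtain ⟨sj, hsj, hj'⟩ := pv_str_of_mem j hj
    obtain ⟨sk, hsk, hk'⟩ := pv_str_of_mem k hk
    obtain ⟨sl, hsl, hl'⟩ := pv_str_of_mem l hl
    obtain ⟨sm, hsm, hm'⟩ := pv_str_of_mem m hm
    refine ⟨si, hsi, sj, hsj, sk, hsk, sl, hsl, sm, hsm, String.toList_inj.mp ?_⟩
    simp [heq, hi', hj', hk', hl', hm']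

-- "i+j+k+l+m with each factor a token or empty" = "concatenation of at most 5 tokens"
lemma pv_decomp_iff_lang (w : List Char) :
    (∃ i ∈ pvAllC, ∃ j ∈ pvAllC, ∃ k ∈ pvAllC, ∃ l ∈ pvAllC, ∃ m ∈ pvAllC,
      w = i ++ j ++ k ++ l ++ m) ↔ pvLang 5 w := by
  constructor
  · rintro ⟨i, hi, j, hj, k, hk, l, hl, m, hm, rfl⟩
    refine ⟨([i, j, k, l, m].filter (· ≠ [])), ?_, ?_, ?_⟩
    · exact le_trans (List.length_filter_le _ _) (by simp)
    · intro t ht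
      have hmem := List.mem_of_mem_filter ht
      have hne : t ≠ [] := by
        have := List.of_mem_filter ht; simpa using this
      simp only [List.mem_cons, List.not_mem_nil, or_false] at hmem
      rcases hmem with rfl | rfl | rfl | rfl | rfl <;>
        first
        | (exact (List.mem_append.mp hi).resolve_right (by simpa using hne))
        | (exact (List.mem_append.mp hj).resolve_right (by simpa using hne))
        | (exact (List.mem_append.mp hk).resolve_right (by simpa using hne))
        | (exact (List.mem_append.mp hl).resolve_right (by simpa using hne))
        | (exact (List.mem_append.mp hm).resolve_right (by simpa using hne))
    · rw [List.flatten_filter_ne_nil]; simp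
  · rintro ⟨toks, hlen, hmem, rfl⟩
    have hnil : ([] : List Char) ∈ pvAllC := by decide
    have htok : ∀ t ∈ toks, t ∈ pvAllC := fun t ht => List.mem_append_left _ (hmem t ht)
    rcases toks with _ | ⟨a, _ | ⟨b, _ | ⟨c, _ | ⟨d, _ | ⟨e, _ | ⟨f, rest⟩⟩⟩⟩⟩⟩
    · exact ⟨[], hnil, [], hnil, [], hnil, [], hnil, [], hnil, by simp⟩
    · exact ⟨a, htok a (by simp), [], hnil, [], hnil, [], hnil, [], hnil, by simp⟩
    · exact ⟨a, htok a (by simp), b, htok b (by simp), [], hnil, [], hnil, [], hnil, by simp⟩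
    · exact ⟨a, htok a (by simp), b, htok b (by simp), c, htok c (by simp), [], hnil, [], hnil,
        by simp⟩
    · exact ⟨a, htok a (by simp), b, htok b (by simp), c, htok c (by simp), d, htok d (by simp),
        [], hnil, by simp⟩
    · exact ⟨a, htok a (by simp), b, htok b (by simp), c, htok c (by simp), d, htok d (by simp),
        e, htok e (by simp), by simp⟩
    · exfalso; simp at hlen; omega

lemma pvStrip_nil (n : Nat) : pvStrip [] n = [] := by cases n <;> rfl

-- the four tokens have pairwise distinct first letters, so the greedy scan finds exactly
-- the token the word starts with
lemma pvFindTok_of_prefix (t : List Char) (ht : t ∈ pvTokens) (r : List Char) :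
    pvFindTok (t ++ r) = some t := by
  simp only [pvTokens, List.mem_cons, List.not_mem_nil, or_false] at ht
  rcases ht with rfl | rfl | rfl | rfl <;>
    simp [pvFindTok, pvTokens, List.find?, PySem.Chars.startswith, List.isPrefixOf]

lemma pv_token_ne_nil (t : List Char) (ht : t ∈ pvTokens) : t ≠ [] := by
  simp only [pvTokens, List.mem_cons, List.not_mem_nil, or_false] at ht
  rcases ht with rfl | rfl | rfl | rfl <;> simp

-- a concatenation of ≤ n tokens is consumed by the greedy loop with budget n
lemma pv_greedy_complete (toks : List (List Char)) : ∀ (n : Nat) (w : List Char),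
    toks.length ≤ n → (∀ t ∈ toks, t ∈ pvTokens) → w = toks.flatten → pvStrip w n = [] := by
  induction toks with
  | nil => intro n w _ _ hw; simp at hw; subst hw; exact pvStrip_nil n
  | cons t rest ih =>
    intro n w hlen hmem hw
    have htok : t ∈ pvTokens := hmem t (by simp)
    obtain ⟨n', rfl⟩ : ∃ n', n = n' + 1 := by
      cases n with
      | zero => simp at hlen
      | succ k => exact ⟨k, rfl⟩
    have hwne : w ≠ [] := by
      simp only [hw, List.flatten_cons]
      exact fun h => pv_token_ne_nil t htok (List.append_eq_nil_iff.mp h).1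
    rw [pvStrip, if_neg hwne, hw, List.flatten_cons, pvFindTok_of_prefix t htok _]
    dsimp only
    rw [List.drop_left]
    exact ih n' _ (by simpa using hlen) (fun u hu => hmem u (by simp [hu])) rfl

-- whatever the greedy loop consumes entirely within budget n is a concatenation of ≤ n tokens
lemma pv_greedy_sound (n : Nat) : ∀ (w : List Char), pvStrip w n = [] → pvLang n w := by
  induction n with
  | zero => intro w h; exact ⟨[], by simp, by simp, by simpa [pvStrip] using h⟩
  | succ n ih =>
    intro w h
    by_cases hw : w = []
    · exact ⟨[], by simp, by simp, by simp [hw]⟩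
    · rw [pvStrip, if_neg hw] at h
      cases hf : pvFindTok w with
      | none => rw [hf] at h; exact absurd h hw
      | some t =>
        rw [hf] at h
        have htok : t ∈ pvTokens := List.mem_of_find?_eq_some hf
        have hpre : t <+: w :=
          (PySem.Chars.startswith_iff _ _).mp (by simpa using List.find?_some hf)
        obtain ⟨r, rfl⟩ := hpre
        dsimp only at h
        rw [List.drop_left] at h
        obtain ⟨toks, hlen, hmem, rfl⟩ := ih r h
        exact ⟨t :: toks, by simpa using hlen, by
          intro u hu
          rcases List.mem_cons.mp hu with rfl | hu
          · exact htok
          · exact hmem u hu, by simp⟩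

-- ===== VERDICT (by name: the statement is the Claim_ definition above) =====
set_option maxRecDepth 8192 in
theorem solution_spec : Claim_equal_solution := by
  intro babbling _
  unfold Spec_solution
  simp only [solution, solution_alt]
  apply PySem.List.foldl_congr_mem
  intro acc w _
  refine if_congr ?_ rfl rfl
  rw [pv_mem_tp_iff, pv_str_decomp_iff_char, pv_decomp_iff_lang]
  constructor
  · rintro ⟨toks, hlen, hmem, hw⟩
    exact pv_greedy_complete toks 5 _ hlen hmem hw
  · exact pv_greedy_sound 5 _
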